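-- pv_equiv track=rewrite | github.com/WM-misc/StegLab | codefile/f0a4058fd33489695d53df156b77c724/encry.py | key_to_bin
-- ===== SOURCE A (Python) =====
-- def key_to_bin(key):
--     key = key.encode()
--     if len(key) <= 10:
--         key += b'\x00' * (10 - len(key))
--     key_bin = ''
--     for byte in key:
--         key_bin += bin(byte)[2:].zfill(8)
--     return key_bin
-- ===== SOURCE B (Python) =====
-- def key_to_bin(key):
--     data = key.encode()
--     if len(data) <= 10:
--         data += b'\x00' * (10 - len(data))
--     n = int.from_bytes(data, 'big')
--     bits = []
--     for _ in range(8 * len(data)):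
--         bits.append('1' if n % 2 == 1 else '0')
--         n //= 2
--     return ''.join(reversed(bits))
-- ===== Notes on version B (the rewrite author's own statement) =====
-- stated objective: alternative
-- what changed: B converts the whole padded byte string to one big integer and extracts its 8*len bits least-significant first by repeated division, reversing at the end, instead of A's per-byte bin(byte)[2:].zfill(8) string concatenation.
import Mathlib
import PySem

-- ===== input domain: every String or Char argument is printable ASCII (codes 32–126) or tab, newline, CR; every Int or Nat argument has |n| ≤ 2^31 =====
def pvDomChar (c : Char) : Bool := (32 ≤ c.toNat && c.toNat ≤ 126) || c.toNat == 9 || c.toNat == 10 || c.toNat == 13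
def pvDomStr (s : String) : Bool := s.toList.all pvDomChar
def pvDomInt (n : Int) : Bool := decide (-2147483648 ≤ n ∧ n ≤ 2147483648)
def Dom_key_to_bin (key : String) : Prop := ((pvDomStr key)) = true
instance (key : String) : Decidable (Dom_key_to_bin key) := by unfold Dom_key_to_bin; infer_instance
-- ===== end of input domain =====

-- B extracts the 8*len bits of one big int.from_bytes integer by repeated division
-- (LSB first, reversed at the end) instead of concatenating bin(byte)[2:].zfill(8)
-- per byte (alternative algorithm; same cost).

-- ===== PORT A =====
-- key.encode() followed by padding with b'\x00' to 10 bytes when len <= 10 (exact on ASCII)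
def pvPad (bs : List Nat) : List Nat :=
  if bs.length ≤ 10 then bs ++ List.replicate (10 - bs.length) 0 else bs

def pvBitChar (n : Nat) : Char := if n = 1 then '1' else '0'

-- binary digits of n without the '0b' prefix, empty for 0 (bin(n)[2:] core)
def pvBinDigits (n : Nat) : List Char :=
  if h : n = 0 then [] else pvBinDigits (n / 2) ++ [pvBitChar (n % 2)]
  decreasing_by exact Nat.div_lt_self (Nat.pos_of_ne_zero h) one_lt_two

-- Python bin(n)[2:]: '0' for 0
def pvBin (n : Nat) : List Char := if n = 0 then ['0'] else pvBinDigits n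

-- Python str.zfill on a digit string (no sign handling needed here)
def pvZfill (w : Nat) (s : List Char) : List Char := List.replicate (w - s.length) '0' ++ s

def key_to_bin (key : String) : String :=
  let bs := pvPad (key.toList.map Char.toNat)
  String.ofList (bs.foldl (fun acc b => acc ++ pvZfill 8 (pvBin b)) [])

-- ===== PORT B =====
-- the bit-extraction loop of Source B: k iterations of "append bit of n; n //= 2",
-- with the final reversed-join realised by consing onto the accumulator
def altLoop : Nat → Nat → List Char → List Char
  | 0, _, acc => acc
  | k + 1, n, acc => altLoop k (n / 2) ((if n % 2 = 1 then '1' else '0') :: acc)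

def key_to_bin_alt (key : String) : String :=
  let data0 := key.toList.map Char.toNat
  let data := if data0.length ≤ 10 then data0 ++ List.replicate (10 - data0.length) 0 else data0
  let n := data.foldl (fun a b => a * 256 + b) 0    -- int.from_bytes(data, 'big')
  String.ofList (altLoop (8 * data.length) n [])

-- ===== PRECONDITION & SPEC =====
def Spec_key_to_bin (key : String) (out : String) : Prop := out = key_to_bin_alt key
instance (key : String) (out : String) : Decidable (Spec_key_to_bin key out) := by unfold Spec_key_to_bin; infer_instance

-- ===== CLAIM (what is proved, stated in full; the proofs are below) =====
def Claim_equal_key_to_bin : Prop := ∀ (key : String), Dom_key_to_bin key → Spec_key_to_bin key (key_to_bin key)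

-- ===== LEMMAS AND PROOFS =====

-- fixed-width binary representation (k low bits of b)
def pvFixedBits : Nat → Nat → List Char
  | 0, _ => []
  | k+1, b => pvFixedBits k (b / 2) ++ [pvBitChar (b % 2)]

theorem pvBinDigits_len : ∀ (k b : Nat), b < 2 ^ k → (pvBinDigits b).length ≤ k := by
  intro k
  induction k with
  | zero =>
      intro b hb
      interval_cases b
      simp [pvBinDigits]
  | succ k ih =>
      intro b hb
      by_cases h : b = 0
      · simp [h, pvBinDigits]
      · rw [pvBinDigits, dif_neg h]
        have hd : b / 2 < 2 ^ k := by
          have := Nat.pow_succ 2 k ▸ hb; omega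
        have hlen := ih (b / 2) hd
        simp only [List.length_append, List.length_cons, List.length_nil]
        omega

theorem pvFixedBits_zero (k : Nat) : pvFixedBits k 0 = List.replicate k '0' := by
  induction k with
  | zero => rfl
  | succ k ih => rw [pvFixedBits]; simp [ih, pvBitChar, List.replicate_succ']

theorem pvFixedBits_eq_pad : ∀ (k b : Nat), b < 2 ^ k →
    pvFixedBits k b = List.replicate (k - (pvBinDigits b).length) '0' ++ pvBinDigits b := by
  intro k
  induction k with
  | zero =>
      intro b hb
      interval_cases b
      simp [pvFixedBits, pvBinDigits]
  | succ k ih =>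
      intro b hb
      by_cases h : b = 0
      · subst h
        simp [pvFixedBits_zero, pvBinDigits]
      · have hd : b / 2 < 2 ^ k := by
          have := Nat.pow_succ 2 k ▸ hb; omega
        rw [pvFixedBits, ih (b / 2) hd]
        conv_rhs => rw [pvBinDigits, dif_neg h]
        have hlen := pvBinDigits_len k (b / 2) hd
        rw [List.length_append]
        simp only [List.length_singleton]
        rw [List.append_assoc]
        have he : k + 1 - ((pvBinDigits (b / 2)).length + 1) = k - (pvBinDigits (b / 2)).length := by omega
        rw [he]

theorem pvZfill_eq_fixedBits (k b : Nat) (hb : b < 2 ^ k) (hk : 1 ≤ k) :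
    pvZfill k (pvBin b) = pvFixedBits k b := by
  by_cases h : b = 0
  · subst h
    have hb0 : pvBin 0 = ['0'] := rfl
    simp only [pvZfill, hb0, pvFixedBits_zero, List.length_singleton]
    rw [← List.replicate_succ' (n := k - 1)]
    congr 1
    omega
  · rw [pvFixedBits_eq_pad k b hb]
    simp [pvZfill, pvBin, h]

theorem pvFixedBits_split : ∀ (k j hi lo : Nat), lo < 2 ^ k →
    pvFixedBits (j + k) (hi * 2 ^ k + lo) = pvFixedBits j hi ++ pvFixedBits k lo := by
  intro k
  induction k with
  | zero =>
      intro j hi lo hlo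
      interval_cases lo
      simp [pvFixedBits]
  | succ k ih =>
      intro j hi lo hlo
      have h1 : j + (k + 1) = (j + k) + 1 := by omega
      rw [h1, pvFixedBits]
      have hpow : hi * 2 ^ (k + 1) = 2 * (hi * 2 ^ k) := by rw [Nat.pow_succ]; ring
      have hlo' : lo < 2 * 2 ^ k := by rw [Nat.pow_succ] at hlo; omega
      have hdiv : (hi * 2 ^ (k + 1) + lo) / 2 = hi * 2 ^ k + lo / 2 := by
        rw [hpow]
        generalize hi * 2 ^ k = A
        omega
      have hmod : (hi * 2 ^ (k + 1) + lo) % 2 = lo % 2 := by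
        rw [hpow]
        generalize hi * 2 ^ k = A
        omega
      rw [hdiv, hmod, ih j hi (lo / 2) (by omega)]
      rw [pvFixedBits]
      simp

theorem pvFromBytes_acc : ∀ (bs : List Nat) (a : Nat),
    bs.foldl (fun a b => a * 256 + b) a
      = a * 2 ^ (8 * bs.length) + bs.foldl (fun a b => a * 256 + b) 0 := by
  intro bs
  induction bs with
  | nil => intro a; simp
  | cons b bs ih =>
      intro a
      simp only [List.foldl_cons, List.length_cons]
      rw [ih (a * 256 + b), ih (0 * 256 + b)]
      have : 2 ^ (8 * (bs.length + 1)) = 2 ^ (8 * bs.length) * 256 := by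
        rw [show 8 * (bs.length + 1) = 8 * bs.length + 8 from by ring, Nat.pow_add]
      rw [this]; ring

theorem pvFromBytes_lt : ∀ (bs : List Nat), (∀ b ∈ bs, b < 256) →
    bs.foldl (fun a b => a * 256 + b) 0 < 2 ^ (8 * bs.length) := by
  intro bs
  induction bs with
  | nil => intro _; simp
  | cons b bs ih =>
      intro h
      simp only [List.foldl_cons, List.length_cons]
      rw [pvFromBytes_acc bs (0 * 256 + b)]
      have hb : b < 256 := h b (by simp)
      have hrest := ih (fun x hx => h x (by simp [hx]))
      have hpow : 2 ^ (8 * (bs.length + 1)) = 256 * 2 ^ (8 * bs.length) := by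
        rw [show 8 * (bs.length + 1) = 8 + 8 * bs.length from by ring, Nat.pow_add]
      rw [hpow]
      have h1 : (0 * 256 + b) * 2 ^ (8 * bs.length) ≤ 255 * 2 ^ (8 * bs.length) := by
        apply Nat.mul_le_mul_right; omega
      omega

theorem pvFlatMap_eq_fixedBits : ∀ (bs : List Nat), (∀ b ∈ bs, b < 256) →
    bs.flatMap (fun b => pvFixedBits 8 b)
      = pvFixedBits (8 * bs.length) (bs.foldl (fun a b => a * 256 + b) 0) := by
  intro bs
  induction bs with
  | nil => simp [pvFixedBits]
  | cons b bs ih =>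
      intro h
      have hrest : ∀ x ∈ bs, x < 256 := fun x hx => h x (by simp [hx])
      simp only [List.flatMap_cons, List.foldl_cons, List.length_cons]
      rw [ih hrest]
      rw [pvFromBytes_acc bs (0 * 256 + b)]
      have hlt := pvFromBytes_lt bs hrest
      have h1 : 8 * (bs.length + 1) = 8 + 8 * bs.length := by ring
      rw [h1, pvFixedBits_split (8 * bs.length) 8 (0 * 256 + b) _ hlt]
      norm_num

theorem pvByte_block (b : Nat) (hb : b < 256) : pvZfill 8 (pvBin b) = pvFixedBits 8 b :=
  pvZfill_eq_fixedBits 8 b (by norm_num; omega) (by norm_num)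

theorem altLoop_eq_fixedBits : ∀ (k n : Nat) (acc : List Char),
    altLoop k n acc = pvFixedBits k n ++ acc := by
  intro k
  induction k with
  | zero => intro n acc; simp [altLoop, pvFixedBits]
  | succ k ih =>
      intro n acc
      rw [altLoop, ih, pvFixedBits, List.append_assoc]
      have : (if n % 2 = 1 then '1' else '0') = pvBitChar (n % 2) := by
        rfl
      simp [this]

theorem pvMain (bs : List Nat) (h : ∀ b ∈ bs, b < 256) :
    bs.foldl (fun acc b => acc ++ pvZfill 8 (pvBin b)) []
      = altLoop (8 * bs.length) (bs.foldl (fun a b => a * 256 + b) 0) [] := by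
  rw [PySem.List.foldl_append_eq_flatMap, List.nil_append]
  have h1 : bs.flatMap (fun b => pvZfill 8 (pvBin b)) = bs.flatMap (fun b => pvFixedBits 8 b) := by
    apply List.flatMap_congr
    intro b hb
    exact pvByte_block b (h b hb)
  rw [h1, pvFlatMap_eq_fixedBits bs h, altLoop_eq_fixedBits, List.append_nil]

theorem pvPad_mem (bs : List Nat) (h : ∀ x ∈ bs, x < 256) :
    ∀ x ∈ pvPad bs, x < 256 := by
  intro x hx
  unfold pvPad at hx
  split at hx
  · rcases List.mem_append.mp hx with h' | h'
    · exact h x h'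
    · have := List.eq_of_mem_replicate h'; omega
  · exact h x hx

-- ===== VERDICT (by name: the statement is the Claim_ definition above) =====
theorem key_to_bin_spec : Claim_equal_key_to_bin := by
  intro key hdom
  unfold Spec_key_to_bin key_to_bin key_to_bin_alt
  have hc : ∀ x ∈ key.toList.map Char.toNat, x < 256 := by
    intro x hx
    obtain ⟨c, hcmem, rfl⟩ := List.mem_map.mp hx
    have := List.all_eq_true.mp hdom c hcmem
    simp [pvDomChar] at this
    omega
  have hpadeq : pvPad (key.toList.map Char.toNat)
      = (if (key.toList.map Char.toNat).length ≤ 10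
         then key.toList.map Char.toNat ++ List.replicate (10 - (key.toList.map Char.toNat).length) 0
         else key.toList.map Char.toNat) := rfl
  simp only [← hpadeq]
  exact congrArg String.ofList (pvMain _ (pvPad_mem _ hc))
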